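-- pv_equiv track=rewrite | github.com/danilfedorenko/-3 | Laboratornaya_3.py | is_direct_bus
-- ===== SOURCE A (Python) =====
-- def is_direct_bus(stop1, stop2, routes):
--     for route in routes:
--         found_first = False
--         for stop in route:
--             if stop == stop1:
--                 found_first = True
--             if found_first and stop == stop2:
--                 return True
--     return False
-- ===== SOURCE B (Python) =====
-- def is_direct_bus(stop1, stop2, routes):
--     for route in routes:
--         pairs = list(enumerate(route))
--         first = {stop: i for i, stop in reversed(pairs)}
--         last = {stop: i for i, stop in pairs}
--         if stop1 in first and stop2 in last and first[stop1] <= last[stop2]: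
--             return True
--     return False
-- ===== Notes on version B (the rewrite author's own statement) =====
-- stated objective: alternative
-- what changed: Replaces A's flag-carrying sequential pattern scan by a position-table algorithm: per route it builds first- and last-occurrence index dictionaries from enumerate (one forward, one reversed) and decides by comparing the coordinates first[stop1] <= last[stop2].
import Mathlib
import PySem

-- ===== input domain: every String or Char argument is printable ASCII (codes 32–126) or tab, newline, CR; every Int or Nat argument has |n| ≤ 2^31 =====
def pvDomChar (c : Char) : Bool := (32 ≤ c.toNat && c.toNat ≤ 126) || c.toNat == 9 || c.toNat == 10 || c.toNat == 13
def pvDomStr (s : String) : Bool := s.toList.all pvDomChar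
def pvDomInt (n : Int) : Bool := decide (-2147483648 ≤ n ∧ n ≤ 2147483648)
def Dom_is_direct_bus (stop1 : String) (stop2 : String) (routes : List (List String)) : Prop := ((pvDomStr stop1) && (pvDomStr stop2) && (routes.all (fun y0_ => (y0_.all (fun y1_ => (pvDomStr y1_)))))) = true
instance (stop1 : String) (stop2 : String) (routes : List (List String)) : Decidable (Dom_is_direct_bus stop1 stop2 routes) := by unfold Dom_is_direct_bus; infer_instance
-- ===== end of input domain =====

-- B replaces A's flag-carrying sequential scan by a position-table approach: per route it builds
-- first/last-occurrence index dictionaries and answers by comparing coordinates. Same cost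
-- class, an alternative algorithm; proved equal on all inputs.

-- ===== PORT A =====
-- inner 'for stop in route' loop of A, carrying the found_first flag; true = early 'return True'
def pvARoute (stop1 stop2 : String) : List String → Bool → Bool
  | [], _ => false
  | s :: rest, found =>
    let found' := if s == stop1 then true else found
    if found' && (s == stop2) then true else pvARoute stop1 stop2 rest found'

def is_direct_bus (stop1 : String) (stop2 : String) : List (List String) → Bool
  | [] => false
  | r :: rs => if pvARoute stop1 stop2 r false then true else is_direct_bus stop1 stop2 rs

-- ===== PORT B =====
-- per-route body of B: pairs = list(enumerate(route)); first = {stop: i for i, stop in reversed(pairs)};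
-- last = {stop: i for i, stop in pairs}; then the membership-guarded index comparison.
def pvBRoute (stop1 stop2 : String) (route : List String) : Bool :=
  let pairs := PySem.List.enumerate route
  let first := pairs.reverse.foldl (fun d p => d.insert p.2 p.1) (PySem.Dict.empty : PySem.Dict String Int)
  let last := pairs.foldl (fun d p => d.insert p.2 p.1) (PySem.Dict.empty : PySem.Dict String Int)
  first.contains stop1 && last.contains stop2 && decide (first.getD stop1 0 ≤ last.getD stop2 0)

def is_direct_bus_alt (stop1 : String) (stop2 : String) : List (List String) → Bool
  | [] => false
  | r :: rs => if pvBRoute stop1 stop2 r then true else is_direct_bus_alt stop1 stop2 rs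

-- ===== PRECONDITION & SPEC =====
def Spec_is_direct_bus (stop1 : String) (stop2 : String) (routes : List (List String)) (out : Bool) : Prop := out = is_direct_bus_alt stop1 stop2 routes
instance (stop1 : String) (stop2 : String) (routes : List (List String)) (out : Bool) : Decidable (Spec_is_direct_bus stop1 stop2 routes out) := by unfold Spec_is_direct_bus; infer_instance

-- ===== CLAIM (what is proved, stated in full; the proofs are below) =====
def Claim_equal_is_direct_bus : Prop := ∀ (stop1 : String) (stop2 : String) (routes : List (List String)), Dom_is_direct_bus stop1 stop2 routes → Spec_is_direct_bus stop1 stop2 routes (is_direct_bus stop1 stop2 routes)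

-- ===== LEMMAS AND PROOFS =====

-- bridge form of the per-route check: first index of stop1, then membership on the suffix
def pvC (stop1 stop2 : String) (route : List String) : Bool :=
  if route.contains stop1 then
    match PySem.List.index? route stop1 with
    | some i => (PySem.List.slice route (some (i : Int)) none).contains stop2
    | none => false
  else false

-- once found_first is set, A's inner loop is just a membership scan for stop2
theorem pvARoute_true (stop1 stop2 : String) (r : List String) :
    pvARoute stop1 stop2 r true = r.contains stop2 := by
  induction r with
  | nil => simp [pvARoute]
  | cons s rest ih =>
    by_cases h : s = stop2
    · simp [pvARoute, h]
    · simp [pvARoute, h, ih]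
      intro hh; exact absurd hh.symm h

-- A's per-route scan agrees with the bridge form
theorem pvAC_eq (stop1 stop2 : String) (r : List String) :
    pvARoute stop1 stop2 r false = pvC stop1 stop2 r := by
  induction r with
  | nil => simp [pvARoute, pvC]
  | cons s rest ih =>
    by_cases h1 : s = stop1
    · subst h1
      simp only [pvARoute, pvC, BEq.rfl, if_true, Bool.true_and, List.contains_cons]
      rw [PySem.List.index?_cons_self]
      simp only [Int.natCast_zero, PySem.List.slice_zero_start, PySem.List.slice_none_none]
      by_cases h2 : s = stop2
      · simp [h2]
      · simp [h2, pvARoute_true]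
        intro hh; exact absurd hh.symm h2
    · have h1b : (s == stop1) = false := by simp [h1]
      simp only [pvARoute, h1b, Bool.false_eq_true, if_false, Bool.false_and]
      rw [ih]
      unfold pvC
      by_cases hm : rest.contains stop1
      · have hm' : (s :: rest).contains stop1 := by simp_all
        rw [if_pos hm', if_pos hm]
        have hidx : PySem.List.index? (s :: rest) stop1
            = (PySem.List.index? rest stop1).map (· + 1) :=
          PySem.List.index?_cons_of_ne _ (show s ≠ stop1 from h1)
        obtain ⟨i, hi⟩ := Option.isSome_iff_exists.1
          ((PySem.List.index?_isSome_iff rest stop1).2 (by simpa using hm))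
        rw [hidx, hi]
        simp only [Option.map_some]
        have hslice : PySem.List.slice (s :: rest) (some ((i + 1 : Nat) : Int)) none
            = PySem.List.slice rest (some ((i : Nat) : Int)) none := by
          rw [PySem.List.slice_from_natCast, PySem.List.slice_from_natCast]
          simp [List.drop_succ_cons]
        exact_mod_cast (congrArg (·.contains stop2) hslice).symm
      · have hm' : ¬ (s :: rest).contains stop1 := by
          simp_all
          exact fun e => h1 e.symm
        rw [if_neg hm', if_neg hm]

-- lookup in a dict built by a last-write-wins insert loop over (index, stop) pairs
theorem pvGetFold (ps : List (Int × String)) (d : PySem.Dict String Int) (k : String) :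
    (ps.foldl (fun d p => d.insert p.2 p.1) d).get? k
      = ((ps.reverse.find? (fun p => p.2 == k)).map Prod.fst).or (d.get? k) := by
  induction ps generalizing d with
  | nil => simp
  | cons p t ih =>
    simp only [List.foldl_cons, ih, List.reverse_cons, List.find?_append]
    cases ht : t.reverse.find? (fun p => p.2 == k) with
    | some q => simp
    | none =>
      rcases p with ⟨v, s⟩
      by_cases hk : s = k
      · subst hk; simp [List.find?, PySem.Dict.get?_insert_self]
      · have hb : (s == k) = false := by simp [hk]
        simp [List.find?, hb, PySem.Dict.get?_insert_of_ne _ _ (Ne.symm hk)]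

-- first-occurrence lookup: find? over enumerate is index?
theorem pvFirstFind (route : List String) (k : String) (s : Int) :
    (PySem.List.enumerate route s).find? (fun p => p.2 == k)
      = (PySem.List.index? route k).map (fun i => (s + (i : Int), k)) := by
  induction route generalizing s with
  | nil => simp [PySem.List.enumerate, PySem.List.index?]
  | cons x t ih =>
    rw [PySem.List.enumerate_cons]
    by_cases hx : x = k
    · subst hx
      rw [PySem.List.index?_cons_self]
      simp [List.find?]
    · have hb : (x == k) = false := by simp [hx]
      rw [PySem.List.index?_cons_of_ne _ hx]
      simp only [List.find?, hb]
      rw [ih]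
      cases PySem.List.index? t k with
      | none => simp
      | some i =>
        simp only [Option.map_some]
        have : s + 1 + (i : Int) = s + ((i : Int) + 1) := by ring
        simp [this]

-- bound on enumerate indices
theorem pvEnumBound {route : List String} {s : Int} {p : Int × String}
    (hp : p ∈ PySem.List.enumerate route s) : s ≤ p.1 ∧ p.1 < s + route.length := by
  rw [PySem.List.enumerate_eq_zipIdx_map] at hp
  obtain ⟨⟨x, j⟩, hq, hpe⟩ := List.mem_map.1 hp
  have hj : j < route.length := (List.mem_zipIdx (k := 0) (by simpa using hq)).2.1.trans_le (by simp)
  subst hpe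
  refine ⟨by simp, by simp; omega⟩

-- last-occurrence lookup characterises membership in a suffix
theorem pvLastFind (route : List String) (k : String) (i : Nat) (hi : i ≤ route.length) :
    ((route.drop i).contains k)
      = (match (PySem.List.enumerate route 0).reverse.find? (fun p => p.2 == k) with
         | some p => decide ((i : Int) ≤ p.1)
         | none => false) := by
  induction route using List.reverseRecOn generalizing i with
  | nil => simp [PySem.List.enumerate]
  | append_singleton t x ih =>
    rw [PySem.List.enumerate_append]
    simp only [PySem.List.enumerate, List.reverse_append,
      List.reverse_cons, List.reverse_nil, List.nil_append, List.cons_append, List.find?]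
    rcases Nat.lt_or_ge i (t.length + 1) with hlt | hge
    · have hi' : i ≤ t.length := by omega
      rw [List.drop_append_of_le_length hi']
      by_cases hx : x = k
      · subst hx
        simp only [BEq.rfl]
        simp
        omega
      · have hb : (x == k) = false := by simp [hx]
        have hb2 : (k == x) = false := by simp; exact fun e => hx e.symm
        simp only [hb, List.contains_append, List.contains_cons, List.contains_nil,
          hb2, Bool.or_false]
        exact ih i hi'
    · have hi2 : i = t.length + 1 := by
        simp at hi; omega
      subst hi2
      rw [List.drop_eq_nil_of_le (by simp)]
      by_cases hx : x = k
      · subst hx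
        simp only [BEq.rfl]
        simp
      · have hb : (x == k) = false := by simp [hx]
        simp only [hb]
        cases ht : (PySem.List.enumerate t 0).reverse.find? (fun p => p.2 == k) with
        | none => simp
        | some p =>
          have hmem : p ∈ PySem.List.enumerate t 0 :=
            List.mem_reverse.1 (List.mem_of_find?_eq_some ht)
          have hbd := pvEnumBound hmem
          simp
          omega

-- B's per-route check agrees with the bridge form
theorem pvBC_eq (stop1 stop2 : String) (r : List String) :
    pvBRoute stop1 stop2 r = pvC stop1 stop2 r := by
  unfold pvBRoute pvC
  dsimp only
  have hfirst : ((PySem.List.enumerate r 0).reverse.foldl (fun d p => d.insert p.2 p.1)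
      (PySem.Dict.empty : PySem.Dict String Int)).get? stop1
      = (PySem.List.index? r stop1).map (fun i => (i : Int)) := by
    rw [pvGetFold, List.reverse_reverse, pvFirstFind r stop1 0]
    cases PySem.List.index? r stop1 with
    | none => simp
    | some i => simp
  have hlast : ((PySem.List.enumerate r 0).foldl (fun d p => d.insert p.2 p.1)
      (PySem.Dict.empty : PySem.Dict String Int)).get? stop2
      = ((PySem.List.enumerate r 0).reverse.find? (fun p => p.2 == stop2)).map Prod.fst := by
    rw [pvGetFold]; simp
  by_cases hm : r.contains stop1
  · obtain ⟨i, hi⟩ := Option.isSome_iff_exists.1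
      ((PySem.List.index?_isSome_iff r stop1).2 (by simpa using hm))
    obtain ⟨hilen, -, -⟩ := PySem.List.getElem_of_index?_eq_some hi
    rw [if_pos hm, hi]
    dsimp only
    rw [PySem.List.slice_from_natCast]
    rw [pvLastFind r stop2 i (le_of_lt hilen)]
    have hc1 : ((PySem.List.enumerate r 0).reverse.foldl (fun d p => d.insert p.2 p.1)
        (PySem.Dict.empty : PySem.Dict String Int)).contains stop1 = true := by
      rw [PySem.Dict.contains_eq_isSome_get?, hfirst, hi]; rfl
    have hg1 : ((PySem.List.enumerate r 0).reverse.foldl (fun d p => d.insert p.2 p.1)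
        (PySem.Dict.empty : PySem.Dict String Int)).getD stop1 0 = (i : Int) := by
      rw [PySem.Dict.getD_eq_get?_getD, hfirst, hi]; rfl
    cases ht : (PySem.List.enumerate r 0).reverse.find? (fun p => p.2 == stop2) with
    | none =>
      have hc2 : ((PySem.List.enumerate r 0).foldl (fun d p => d.insert p.2 p.1)
          (PySem.Dict.empty : PySem.Dict String Int)).contains stop2 = false := by
        rw [PySem.Dict.contains_eq_isSome_get?, hlast, ht]; rfl
      rw [hc2]; simp
    | some p =>
      have hc2 : ((PySem.List.enumerate r 0).foldl (fun d p => d.insert p.2 p.1)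
          (PySem.Dict.empty : PySem.Dict String Int)).contains stop2 = true := by
        rw [PySem.Dict.contains_eq_isSome_get?, hlast, ht]; rfl
      have hg2 : ((PySem.List.enumerate r 0).foldl (fun d p => d.insert p.2 p.1)
          (PySem.Dict.empty : PySem.Dict String Int)).getD stop2 0 = p.1 := by
        rw [PySem.Dict.getD_eq_get?_getD, hlast, ht]; rfl
      rw [hc1, hc2, hg1, hg2]; simp
  · have hnone : PySem.List.index? r stop1 = none :=
      (PySem.List.index?_eq_none_iff r stop1).2 (by simpa using hm)
    have hc1 : ((PySem.List.enumerate r 0).reverse.foldl (fun d p => d.insert p.2 p.1)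
        (PySem.Dict.empty : PySem.Dict String Int)).contains stop1 = false := by
      rw [PySem.Dict.contains_eq_isSome_get?, hfirst, hnone]; rfl
    rw [if_neg hm]
    rw [hc1]; simp

theorem pv_main (stop1 stop2 : String) (routes : List (List String)) :
    is_direct_bus stop1 stop2 routes = is_direct_bus_alt stop1 stop2 routes := by
  induction routes with
  | nil => rfl
  | cons r rs ih =>
    simp only [is_direct_bus, is_direct_bus_alt, pvAC_eq, pvBC_eq, ih]

-- ===== VERDICT (by name: the statement is the Claim_ definition above) =====
theorem is_direct_bus_spec : Claim_equal_is_direct_bus := by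
  intro stop1 stop2 routes _
  exact pv_main stop1 stop2 routes
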